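-- pv_equiv track=rewrite | github.com/cylissama/music_tools | services/tagging/renamer.py | _first_consistent
-- ===== SOURCE A (Python) =====
-- def _first_consistent(values: list[str | None]) -> str | None:
--     cleaned = [value.strip() for value in values if isinstance(value, str) and value.strip() and value.strip() != "Unknown Year"]
--     if not cleaned:
--         return None
--     counts: dict[str, int] = {}
--     for value in cleaned:
--         counts[value] = counts.get(value, 0) + 1
--     return sorted(counts.items(), key=lambda item: (-item[1], item[0].lower()))[0][0]
-- ===== SOURCE B (Python) =====
-- def _first_consistent(values):
--     cleaned = [value.strip() for value in values if isinstance(value, str) and value.strip() and value.strip() != "Unknown Year"]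
--     if not cleaned:
--         return None
--     return min(cleaned, key=lambda value: (-cleaned.count(value), value.lower()))
-- ===== Notes on version B (the rewrite author's own statement) =====
-- stated objective: simpler
-- what changed: Replaces the hash-table count accumulation plus full sort of the items with a single min() over the cleaned list keyed by (-cleaned.count(v), v.lower()); min's first-winner tie rule reproduces A's stable-sort/insertion-order tie-break exactly, so no dict and no sort are needed.
import Mathlib
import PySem

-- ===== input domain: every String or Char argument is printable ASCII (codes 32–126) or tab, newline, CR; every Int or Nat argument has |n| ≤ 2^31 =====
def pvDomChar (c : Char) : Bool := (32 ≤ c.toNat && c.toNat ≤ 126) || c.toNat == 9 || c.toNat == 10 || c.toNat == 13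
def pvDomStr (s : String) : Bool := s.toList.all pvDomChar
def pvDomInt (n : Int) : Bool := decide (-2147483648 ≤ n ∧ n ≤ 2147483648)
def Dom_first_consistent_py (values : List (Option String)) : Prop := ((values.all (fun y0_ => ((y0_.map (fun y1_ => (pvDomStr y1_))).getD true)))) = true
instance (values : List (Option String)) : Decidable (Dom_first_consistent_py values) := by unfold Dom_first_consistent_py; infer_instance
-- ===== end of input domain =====

-- B replaces A's dict-of-counts plus sort of the items by a single min over the cleaned
-- list keyed by (-count, lower) — same return value everywhere, no dict and no sort (objective: simpler).

-- ===== PORT A =====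
-- shared helper: the identical list comprehension both Pythons start with
def pvClean (values : List (Option String)) : List String :=
  values.filterMap (fun v =>
    match v with
    | none => none
    | some s =>
      if PySem.Str.strip s ≠ "" ∧ PySem.Str.strip s ≠ "Unknown Year" then some (PySem.Str.strip s)
      else none)

def first_consistent_py (values : List (Option String)) : Option String :=
  let cleaned := pvClean values
  if cleaned = [] then none
  else
    let counts : PySem.Dict String Int :=
      cleaned.foldl (fun d v => d.insert v (d.getD v 0 + 1)) PySem.Dict.empty
    (PySem.List.pyGet?
      (PySem.List.sorted2 counts.items (fun p => -p.2) (fun p => PySem.Str.lower p.1)) 0).map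
      (fun p => p.1)

-- ===== PORT B =====
def first_consistent_py_alt (values : List (Option String)) : Option String :=
  let cleaned := pvClean values
  if cleaned = [] then none
  else PySem.List.min2? cleaned (fun v => -(cleaned.count v : Int)) (fun v => PySem.Str.lower v)

-- ===== PRECONDITION & SPEC =====
def Spec_first_consistent_py (values : List (Option String)) (out : Option String) : Prop := out = first_consistent_py_alt values
instance (values : List (Option String)) (out : Option String) : Decidable (Spec_first_consistent_py values out) := by unfold Spec_first_consistent_py; infer_instance

-- ===== CLAIM (what is proved, stated in full; the proofs are below) =====
def Claim_equal_first_consistent_py : Prop := ∀ (values : List (Option String)), Dom_first_consistent_py values → Spec_first_consistent_py values (first_consistent_py values)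

-- ===== LEMMAS AND PROOFS =====

-- Python's lexicographic two-component strict comparison, as sorted2/min2? use it
def pvLt {α κ₁ κ₂ : Type} [LT κ₁] [DecidableLT κ₁] [LT κ₂] [DecidableLT κ₂]
    (k1 : α → κ₁) (k2 : α → κ₂) (a b : α) : Bool :=
  decide (k1 a < k1 b) || (!decide (k1 b < k1 a) && decide (k2 a < k2 b))

-- the running-minimum step of min2?
def pvStep {α : Type} (ltb : α → α → Bool) (acc : Option α) (x : α) : Option α :=
  match acc with
  | none => some x
  | some m => if ltb x m = true then some x else some m

theorem pvMin2?_eq_foldl {α κ₁ κ₂ : Type} [LT κ₁] [DecidableLT κ₁] [LT κ₂] [DecidableLT κ₂]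
    (l : List α) (k1 : α → κ₁) (k2 : α → κ₂) :
    PySem.List.min2? l k1 k2 = l.foldl (pvStep (pvLt k1 k2)) none := rfl

theorem pvHead?_insertBy {α : Type} (before : α → α → Bool) (x : α) (l : List α) :
    (PySem.List.insertBy before x l).head? = pvStep before l.head? x := by
  cases l with
  | nil => simp [PySem.List.insertBy, pvStep]
  | cons h t =>
    by_cases hb : before x h = true <;> simp [PySem.List.insertBy, pvStep, hb]

theorem pvHead?_foldl_insertBy {α : Type} (before : α → α → Bool) :
    ∀ (l acc : List α),
      (l.foldl (fun a x => PySem.List.insertBy before x a) acc).head? =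
        l.foldl (pvStep before) acc.head? := by
  intro l
  induction l with
  | nil => intro acc; rfl
  | cons x t ih =>
    intro acc
    simp only [List.foldl_cons]
    rw [ih, pvHead?_insertBy]

-- head of the stable insertion sort is exactly Python's min (first extremal element)
theorem pvHead?_sorted2 {α κ₁ κ₂ : Type} [LT κ₁] [DecidableLT κ₁] [LT κ₂] [DecidableLT κ₂]
    (l : List α) (k1 : α → κ₁) (k2 : α → κ₂) :
    (PySem.List.sorted2 l k1 k2 false).head? = PySem.List.min2? l k1 k2 := by
  rw [pvMin2?_eq_foldl]
  exact pvHead?_foldl_insertBy (pvLt k1 k2) l []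

theorem pvMin2?_map {α β κ₁ κ₂ : Type} [LT κ₁] [DecidableLT κ₁] [LT κ₂] [DecidableLT κ₂]
    (f : α → β) (k1 : β → κ₁) (k2 : β → κ₂) (l : List α) :
    PySem.List.min2? (l.map f) k1 k2 =
      (PySem.List.min2? l (fun x => k1 (f x)) (fun x => k2 (f x))).map f := by
  rw [pvMin2?_eq_foldl, pvMin2?_eq_foldl]
  have aux : ∀ (l : List α) (acc : Option α),
      (l.map f).foldl (pvStep (pvLt k1 k2)) (acc.map f) =
        (l.foldl (pvStep (pvLt (fun x => k1 (f x)) (fun x => k2 (f x)))) acc).map f := by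
    intro l
    induction l with
    | nil => intro acc; rfl
    | cons x t ih =>
      intro acc
      simp only [List.map_cons, List.foldl_cons]
      rw [← ih]
      congr 1
      cases acc with
      | none => rfl
      | some m =>
        have hb : pvLt k1 k2 (f x) (f m) = pvLt (fun x => k1 (f x)) (fun x => k2 (f x)) x m := rfl
        simp only [pvStep, Option.map_some, hb]
        by_cases h : pvLt (fun x => k1 (f x)) (fun x => k2 (f x)) x m = true
        · simp [h]
        · simp [h]
  simpa using aux l none

theorem pvPyGet?_zero {α : Type} (l : List α) : PySem.List.pyGet? l 0 = l.head? := by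
  cases l <;> simp [PySem.List.pyGet?, PySem.List.pyIdx?]

-- ordered dedup (keep first occurrences), with an explicit "seen" list
def pvDedup {α : Type} [BEq α] : List α → List α → List α
  | [], _ => []
  | x :: t, s => if s.contains x then pvDedup t s else x :: pvDedup t (s ++ [x])

theorem pvFoldl_add_eq_dedup {α : Type} [BEq α] :
    ∀ (l s : List α), l.foldl PySem.Set.add s = s ++ pvDedup l s := by
  intro l
  induction l with
  | nil => intro s; simp [pvDedup]
  | cons x t ih =>
    intro s
    by_cases hc : s.contains x = true
    · simp [PySem.Set.add, hc, pvDedup, ih]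
    · simp only [List.foldl_cons, pvDedup, hc]
      rw [show PySem.Set.add s x = s ++ [x] by simp [PySem.Set.add, hc]]
      rw [ih (s ++ [x])]
      simp

theorem pvSetOfList_eq_dedup {α : Type} [BEq α] (l : List α) :
    PySem.Set.ofList l = pvDedup l [] := by
  have := pvFoldl_add_eq_dedup l []
  simpa [PySem.Set.ofList, PySem.Set.empty] using this

-- the running-minimum fold ignores repeated occurrences of already-seen elements
theorem pvFoldl_step_dedup {α : Type} [BEq α] [LawfulBEq α] (ltb : α → α → Bool)
    (hirr : ∀ a, ltb a a = false)
    (htr : ∀ a b c, ltb a b = true → ltb c b = false → ltb c a = false) :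
    ∀ (l s : List α) (m : α), (∀ y ∈ s, ltb y m = false) →
      (pvDedup l s).foldl (pvStep ltb) (some m) = l.foldl (pvStep ltb) (some m) := by
  intro l
  induction l with
  | nil => intro s m _; rfl
  | cons x t ih =>
    intro s m hs
    by_cases hc : s.contains x = true
    · have hxm : ltb x m = false := hs x (by simpa using hc)
      have h1 : pvDedup (x :: t) s = pvDedup t s := by
        simp only [pvDedup, hc, reduceIte]
      have h2 : pvStep ltb (some m) x = some m := by simp [pvStep, hxm]
      rw [h1, List.foldl_cons, h2]
      exact ih s m hs
    · have hc' : s.contains x = false := Bool.eq_false_iff.mpr hc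
      have h1 : pvDedup (x :: t) s = x :: pvDedup t (s ++ [x]) := by
        simp only [pvDedup, hc', Bool.false_eq_true, reduceIte]
      rw [h1, List.foldl_cons, List.foldl_cons]
      by_cases hxm : ltb x m = true
      · have h2 : pvStep ltb (some m) x = some x := by simp [pvStep, hxm]
        rw [h2]
        apply ih (s ++ [x]) x
        intro y hy
        rcases List.mem_append.mp hy with hy | hy
        · exact htr x m y hxm (hs y hy)
        · have hyx : y = x := by simpa using hy
          subst hyx; exact hirr y
      · have hxm' : ltb x m = false := Bool.eq_false_iff.mpr hxm
        have h2 : pvStep ltb (some m) x = some m := by simp [pvStep, hxm']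
        rw [h2]
        apply ih (s ++ [x]) m
        intro y hy
        rcases List.mem_append.mp hy with hy | hy
        · exact hs y hy
        · have hyx : y = x := by simpa using hy
          subst hyx; exact hxm'

-- the two order facts pvFoldl_step_dedup needs, for lexicographic keys into linear orders
theorem pvLt_irrefl {α κ₁ κ₂ : Type} [LinearOrder κ₁] [LinearOrder κ₂]
    (k1 : α → κ₁) (k2 : α → κ₂) (a : α) : pvLt k1 k2 a a = false := by
  simp [pvLt]

theorem pvLt_trans_neg {α κ₁ κ₂ : Type} [LinearOrder κ₁] [LinearOrder κ₂]
    (k1 : α → κ₁) (k2 : α → κ₂) (a b c : α)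
    (h1 : pvLt k1 k2 a b = true) (h2 : pvLt k1 k2 c b = false) :
    pvLt k1 k2 c a = false := by
  simp only [pvLt, Bool.or_eq_true, Bool.and_eq_true, Bool.not_eq_true', decide_eq_true_eq,
    decide_eq_false_iff_not, Bool.or_eq_false_iff, Bool.and_eq_false_iff,
    Bool.not_eq_false'] at h1 h2 ⊢
  rcases h2 with ⟨hcb, h2⟩
  have hbc : k1 b ≤ k1 c := not_lt.mp hcb
  rcases h1 with h1 | ⟨hba, h1⟩
  · -- k1 a < k1 b ≤ k1 c
    have hac : k1 a < k1 c := lt_of_lt_of_le h1 hbc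
    refine ⟨not_lt.mpr (le_of_lt hac), Or.inl (by simpa using hac)⟩
    -- first component strictly increases, so neither c < a nor a ≥ c lexicographically
  · -- k1 a = k1 b is not forced, but ¬ k1 b < k1 a, i.e. k1 a ≤ k1 b, and k2 a < k2 b
    have hab : k1 a ≤ k1 b := not_lt.mp hba
    have hac : k1 a ≤ k1 c := le_trans hab hbc
    refine ⟨not_lt.mpr hac, ?_⟩
    by_cases hlt : k1 a < k1 c
    · exact Or.inl (by simpa using hlt)
    · have hca : k1 c ≤ k1 a := not_lt.mp hlt
      have hac' : k1 a = k1 c := le_antisymm hac hca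
      have hbc' : k1 b = k1 c := le_antisymm hbc (hac' ▸ hab)
      rcases h2 with h2 | h2
      · exact absurd (hbc' ▸ h2) (lt_irrefl _)
      · right
        intro hca'
        exact h2 (lt_trans hca' h1)

-- ===== VERDICT (by name: the statement is the Claim_ definition above) =====
theorem first_consistent_py_spec : Claim_equal_first_consistent_py := by
  intro values _
  unfold Spec_first_consistent_py first_consistent_py first_consistent_py_alt
  by_cases h : pvClean values = []
  · simp [h]
  · simp only [h, if_false]
    set cleaned := pvClean values with hcl
    -- A's count loop is collections.Counter
    have hcnt : cleaned.foldl (fun d v => d.insert v (d.getD v 0 + 1)) PySem.Dict.empty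
        = PySem.Dict.counter cleaned := rfl
    rw [hcnt, pvPyGet?_zero, pvHead?_sorted2, PySem.Dict.items_counter, pvMin2?_map]
    -- collapse the pair projections
    have hkeys :
        PySem.List.min2? (PySem.Set.ofList cleaned)
            (fun x => -(x, (List.count x cleaned : Int)).2)
            (fun x => PySem.Str.lower (x, (List.count x cleaned : Int)).1)
          = PySem.List.min2? (PySem.Set.ofList cleaned)
              (fun v => -(cleaned.count v : Int)) (fun v => PySem.Str.lower v) := rfl
    rw [hkeys]
    rw [Option.map_map]
    have hfst : ((fun p : String × Int => p.1) ∘ fun k => (k, (List.count k cleaned : Int)))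
        = fun v => v := rfl
    rw [hfst, Option.map_id_fun']
    simp only [id_eq]
    -- now remove the dedup
    rw [pvSetOfList_eq_dedup]
    obtain ⟨c, cs, hcc⟩ := List.exists_cons_of_ne_nil h
    rw [hcc]
    have hdc : pvDedup (c :: cs) ([] : List String) = c :: pvDedup cs [c] := by
      simp [pvDedup]
    rw [hdc, pvMin2?_eq_foldl, pvMin2?_eq_foldl]
    simp only [List.foldl_cons]
    exact pvFoldl_step_dedup _ (pvLt_irrefl _ _) (pvLt_trans_neg _ _) cs [c] c
      (by intro y hy
          have hyx : y = c := by simpa using hy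
          subst hyx
          exact pvLt_irrefl _ _ y)
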